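-- pv_equiv track=rewrite | github.com/phil-huynh/Problem-Sets | python/array.py | find_list_difference
-- ===== SOURCE A (Python) =====
-- def find_list_difference(nums1, nums2):
--     nums1.sort()
--     result = []
--     checker = dict.fromkeys(nums2, True)
--
--     for number in nums1:
--         num1_in_num2 = checker.get(number)
--         if not num1_in_num2:
--             result.append(number)
--
--     return result
-- ===== SOURCE B (Python) =====
-- def find_list_difference(nums1, nums2):
--     nums1.sort()
--     s2 = sorted(nums2)
--     result = []
--     j = 0
--     for number in nums1:
--         while j < len(s2) and s2[j] < number:
--             j += 1
--         if j >= len(s2) or s2[j] != number: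
--             result.append(number)
--     return result
-- ===== Notes on version B (the rewrite author's own statement) =====
-- stated objective: alternative
-- what changed: Replaces the dict.fromkeys hash lookup per element by sorting a copy of nums2 and doing a two-pointer merge over the two sorted lists; same in-place sort of nums1, nums2 untouched.
import Mathlib
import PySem

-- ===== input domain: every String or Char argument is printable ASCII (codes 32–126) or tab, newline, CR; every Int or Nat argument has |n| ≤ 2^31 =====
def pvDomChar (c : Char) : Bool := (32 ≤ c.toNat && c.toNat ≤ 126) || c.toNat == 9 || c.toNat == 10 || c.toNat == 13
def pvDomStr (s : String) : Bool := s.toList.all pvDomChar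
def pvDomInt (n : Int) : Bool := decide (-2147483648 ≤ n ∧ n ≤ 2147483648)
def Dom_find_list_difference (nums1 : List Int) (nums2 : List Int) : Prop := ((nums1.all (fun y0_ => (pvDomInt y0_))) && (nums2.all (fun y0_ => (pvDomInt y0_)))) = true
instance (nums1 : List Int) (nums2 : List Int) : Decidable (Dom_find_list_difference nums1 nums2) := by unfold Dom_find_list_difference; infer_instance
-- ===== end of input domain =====

-- B replaces A's per-element dict lookup by a two-pointer merge over both sorted lists (alternative
-- decomposition, same cost class). Equivalence is about the RETURN value: both Pythons sort nums1 in
-- place (same side effect) and leave nums2 untouched.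

-- ===== PORT A =====
def find_list_difference (nums1 : List Int) (nums2 : List Int) : List Int :=
  let sorted1 := PySem.List.sorted nums1 (fun x => x) false   -- nums1.sort()
  let checker := nums2.foldl (fun d k => d.insert k true) (PySem.Dict.empty : PySem.Dict Int Bool)
  sorted1.foldl (fun result number =>
    let num1_in_num2 := checker.get? number
    if !(num1_in_num2.getD false) then result ++ [number] else result) []
    -- 'not num1_in_num2': None is falsy, the stored value True is truthy

-- ===== PORT B =====
-- while j < len(s2) and s2[j] < number: j += 1
def fldAdvance (s2 : List Int) (number : Int) (j : Nat) : Nat :=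
  if h : j < s2.length then
    if s2[j] < number then fldAdvance s2 number (j + 1) else j
  else j
termination_by s2.length - j

-- for number in sorted nums1: advance j; append when j >= len(s2) or s2[j] != number
def fldGo (s2 : List Int) : List Int → Nat → List Int → List Int
  | [], _, result => result
  | number :: rest, j, result =>
    let j' := fldAdvance s2 number j
    if h : j' < s2.length then
      if s2[j'] ≠ number then fldGo s2 rest j' (result ++ [number])
      else fldGo s2 rest j' result
    else fldGo s2 rest j' (result ++ [number])

def find_list_difference_alt (nums1 : List Int) (nums2 : List Int) : List Int :=
  let sorted1 := PySem.List.sorted nums1 (fun x => x) false   -- nums1.sort()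
  let s2 := PySem.List.sorted nums2 (fun x => x) false        -- sorted(nums2)
  fldGo s2 sorted1 0 []

-- ===== PRECONDITION & SPEC =====
def Spec_find_list_difference (nums1 : List Int) (nums2 : List Int) (out : List Int) : Prop := out = find_list_difference_alt nums1 nums2
instance (nums1 : List Int) (nums2 : List Int) (out : List Int) : Decidable (Spec_find_list_difference nums1 nums2 out) := by unfold Spec_find_list_difference; infer_instance

-- ===== CLAIM (what is proved, stated in full; the proofs are below) =====
def Claim_equal_find_list_difference : Prop := ∀ (nums1 : List Int) (nums2 : List Int), Dom_find_list_difference nums1 nums2 → Spec_find_list_difference nums1 nums2 (find_list_difference nums1 nums2)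

-- ===== LEMMAS AND PROOFS =====

-- dict.fromkeys(nums2, True) answers membership in nums2
theorem get?_fromkeys (nums2 : List Int) (d : PySem.Dict Int Bool) (x : Int) :
    (nums2.foldl (fun d k => d.insert k true) d).get? x
      = if x ∈ nums2 then some true else d.get? x := by
  induction nums2 generalizing d with
  | nil => simp
  | cons k t ih =>
    simp only [List.foldl_cons, ih, List.mem_cons]
    rw [PySem.Dict.get?_insert]
    by_cases hx : x ∈ t <;> by_cases hk : x = k <;> simp [hx, hk]

-- A computes the filter of sorted nums1 by non-membership in nums2
theorem A_eq_filter (nums1 nums2 : List Int) :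
    find_list_difference nums1 nums2
      = (PySem.List.sorted nums1 (fun x => x) false).filter (fun x => decide (x ∉ nums2)) := by
  unfold find_list_difference
  show List.foldl (fun result number =>
      if !((((nums2.foldl (fun d k => d.insert k true)
          (PySem.Dict.empty : PySem.Dict Int Bool)).get? number)).getD false)
      then result ++ [number] else result) [] (PySem.List.sorted nums1 (fun x => x) false) = _
  rw [show (fun (result : List Int) (number : Int) =>
        if !((((nums2.foldl (fun d k => d.insert k true)
            (PySem.Dict.empty : PySem.Dict Int Bool)).get? number)).getD false)
        then result ++ [number] else result)
      = (fun result number => if decide (number ∉ nums2) then result ++ [number] else result) from ?_]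
  · rw [PySem.List.foldl_append_if_eq_filter]
    simp
  · funext result number
    simp only [get?_fromkeys]
    by_cases h : number ∈ nums2 <;> simp [h]

theorem fldAdvance_le (s2 : List Int) (n : Int) (j : Nat) : j ≤ fldAdvance s2 n j := by
  unfold fldAdvance
  split
  · split
    · exact le_trans (Nat.le_succ j) (fldAdvance_le s2 n (j + 1))
    · exact le_refl j
  · exact le_refl j
termination_by s2.length - j

theorem fldAdvance_lt (s2 : List Int) (n : Int) (j : Nat)
    (hj : ∀ i, (h : i < s2.length) → i < j → s2[i] < n) :
    ∀ i, (h : i < s2.length) → i < fldAdvance s2 n j → s2[i] < n := by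
  unfold fldAdvance
  split
  · split
    · refine fldAdvance_lt s2 n (j + 1) ?_
      intro i hi hij
      rcases Nat.lt_succ_iff_lt_or_eq.mp hij with h' | h'
      · exact hj i hi h'
      · subst h'; assumption
    · exact fun i hi hij => hj i hi hij
  · exact fun i hi hij => hj i hi hij
termination_by s2.length - j

theorem fldAdvance_stop (s2 : List Int) (n : Int) (j : Nat) :
    n ≤ s2.getD (fldAdvance s2 n j) n := by
  rw [fldAdvance]
  by_cases hj : j < s2.length
  · simp only [hj, dite_true]
    by_cases hlt : s2[j] < n
    · simp only [hlt, if_true]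
      exact fldAdvance_stop s2 n (j + 1)
    · rw [if_neg hlt, List.getD_eq_getElem _ _ hj]
      omega
  · simp only [hj, dite_false]
    rw [List.getD_eq_default]
    omega
termination_by s2.length - j

-- on a sorted s2 with the scanned prefix strictly below n, the stop position decides membership
theorem fldAdvance_mem (s2 : List Int) (hs2 : s2.Pairwise (· ≤ ·)) (n : Int) (j : Nat)
    (hj : ∀ i, (h : i < s2.length) → i < j → s2[i] < n) :
    ((if h : fldAdvance s2 n j < s2.length then s2[fldAdvance s2 n j] = n else False) ↔ n ∈ s2) := by
  set k := fldAdvance s2 n j with hk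
  have hlt := fldAdvance_lt s2 n j hj
  constructor
  · intro h
    split at h
    · next hkl => rw [← h]; exact List.getElem_mem hkl
    · exact h.elim
  · intro hmem
    obtain ⟨idx, hidx, hval⟩ := List.getElem_of_mem hmem
    have hki : k ≤ idx := by
      by_contra hc
      have := hlt idx hidx (by omega)
      omega
    have hkl : k < s2.length := lt_of_le_of_lt hki hidx
    simp only [hkl, dite_true]
    have h1 : n ≤ s2[k] := by
      have := fldAdvance_stop s2 n j
      rwa [← hk, List.getD_eq_getElem _ _ hkl] at this
    have h2 : s2[k] ≤ n := by
      rcases Nat.lt_or_ge k idx with h' | h'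
      · have := (List.pairwise_iff_getElem.mp hs2) k idx hkl hidx h'
        omega
      · have : k = idx := le_antisymm hki h'
        subst this; omega
    omega

theorem fldGo_eq_filter (s2 : List Int) (hs2 : s2.Pairwise (· ≤ ·)) :
    ∀ (s1 : List Int), s1.Pairwise (· ≤ ·) →
    ∀ (j : Nat) (result : List Int),
    (∀ i, (h : i < s2.length) → i < j → ∀ n ∈ s1, s2[i] < n) →
    fldGo s2 s1 j result = result ++ s1.filter (fun x => decide (x ∉ s2)) := by
  intro s1
  induction s1 with
  | nil => intro _ j result _; simp [fldGo]
  | cons n rest ih =>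
    intro hs1 j result hj
    have hjn : ∀ i, (h : i < s2.length) → i < j → s2[i] < n := by
      intro i hi hij; exact hj i hi hij n (List.mem_cons_self ..)
    have hlt := fldAdvance_lt s2 n j hjn
    have hmem := fldAdvance_mem s2 hs2 n j hjn
    have hrest : ∀ i, (h : i < s2.length) → i < fldAdvance s2 n j → ∀ m ∈ rest, s2[i] < m := by
      intro i hi hij m hm
      have h1 : s2[i] < n := hlt i hi hij
      have h2 : n ≤ m := (List.pairwise_cons.mp hs1).1 m hm
      omega
    have hs1' := (List.pairwise_cons.mp hs1).2
    rw [fldGo]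
    split
    · next hlen =>
      rw [dif_pos hlen] at hmem
      split
      · next hne =>
        have hnm : n ∉ s2 := fun hc => hne (hmem.mpr hc)
        rw [ih hs1' _ _ hrest]
        simp [hnm]
      · next he =>
        have hnm : n ∈ s2 := hmem.mp (not_not.mp he)
        rw [ih hs1' _ _ hrest]
        simp [hnm]
    · next hlen =>
      rw [dif_neg hlen] at hmem
      have hnm : n ∉ s2 := fun hc => hmem.mpr hc
      rw [ih hs1' _ _ hrest]
      simp [hnm]

theorem B_eq_filter (nums1 nums2 : List Int) :
    find_list_difference_alt nums1 nums2
      = (PySem.List.sorted nums1 (fun x => x) false).filter (fun x => decide (x ∉ nums2)) := by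
  unfold find_list_difference_alt
  rw [fldGo_eq_filter _ (by simpa using PySem.List.sorted_pairwise nums2 (fun x => x))
      _ (by simpa using PySem.List.sorted_pairwise nums1 (fun x => x)) 0 []
      (by intro i hi hij; omega)]
  simp only [List.nil_append]
  congr 1
  funext x
  simp [PySem.List.mem_sorted]

-- ===== VERDICT (by name: the statement is the Claim_ definition above) =====
theorem find_list_difference_spec : Claim_equal_find_list_difference := by
  intro nums1 nums2 _
  unfold Spec_find_list_difference
  rw [A_eq_filter, B_eq_filter]
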